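-- pv_equiv track=rewrite | github.com/MatiPl01/Wstep-do-Informatyki | Kolokwia/2019_2020/Kolokwium 1/Zad2 (2).py | is_multiple_of_natural_number_square
-- ===== SOURCE A (Python) =====
-- def is_multiple_of_natural_number_square(num: int) -> bool:
--     n = 2
--
--     while True:
--         n_sq = n**2
--         mul = 2
--
--         if mul * n_sq > num:
--             return False
--
--         while mul * n_sq <= num:
--             if mul * n_sq == num:
--                 return True
--             mul += 1
--         n += 1
-- ===== SOURCE B (Python) =====
-- def _is_square(q):
--     # binary search for an integer square root of q
--     lo, hi = 0, q
--     while lo <= hi: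
--         mid = (lo + hi) // 2
--         sq = mid * mid
--         if sq == q:
--             return True
--         if sq < q:
--             lo = mid + 1
--         else:
--             hi = mid - 1
--     return False
--
--
-- def is_multiple_of_natural_number_square(num: int) -> bool:
--     # iterate over the multiplier; the cofactor num // mul must be a square >= 4
--     mul = 2
--     while 4 * mul <= num:
--         if num % mul == 0:
--             q = num // mul
--             if _is_square(q):
--                 return True
--         mul += 1
--     return False
-- ===== Notes on version B (the rewrite author's own statement) =====
-- stated objective: alternative
-- what changed: Instead of A's nested scan over bases n and multipliers mul, B iterates once over the multiplier mul (while 4*mul <= num) and tests whether the cofactor num//mul is a perfect square by integer binary search.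
import Mathlib
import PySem

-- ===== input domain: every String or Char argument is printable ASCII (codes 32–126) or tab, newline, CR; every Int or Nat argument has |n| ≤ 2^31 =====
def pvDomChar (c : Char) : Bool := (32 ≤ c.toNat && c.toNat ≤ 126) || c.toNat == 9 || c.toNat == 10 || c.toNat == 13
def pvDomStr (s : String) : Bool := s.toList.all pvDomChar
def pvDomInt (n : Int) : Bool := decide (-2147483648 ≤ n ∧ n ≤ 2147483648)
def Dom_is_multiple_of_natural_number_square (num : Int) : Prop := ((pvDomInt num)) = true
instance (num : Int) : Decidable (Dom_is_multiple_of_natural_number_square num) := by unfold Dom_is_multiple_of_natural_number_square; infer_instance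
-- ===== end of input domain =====

-- B replaces A's nested base/multiplier double scan by a single loop over the
-- multiplier with a binary-search perfect-square test of the cofactor (objective: alternative).

-- ===== PORT A =====
-- Inner while loop of A: `while mul * n_sq <= num: ...`.  The Python n_sq = n**2 is
-- always ≥ 1 at every call site; it is passed as k with n_sq = k + 1 so that
-- termination is provable.
def pvInnerA (num : Int) (k : Nat) (mul : Nat) : Bool :=
  if (mul : Int) * ((k : Int) + 1) ≤ num then
    if (mul : Int) * ((k : Int) + 1) = num then true
    else pvInnerA num k (mul + 1)
  else false
termination_by (num + 1 - (mul : Int) * ((k : Int) + 1)).toNat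
decreasing_by
  have h1 : ((mul + 1 : Nat) : Int) * ((k : Int) + 1)
      = (mul : Int) * ((k : Int) + 1) + ((k : Int) + 1) := by push_cast; ring
  generalize (mul : Int) * ((k : Int) + 1) = s at *
  omega

-- Outer `while True` loop of A, n starting at 2 (so n*n - 1 + 1 = n*n throughout).
def pvOuterA (num : Int) (n : Nat) : Bool :=
  if 2 * ((n : Int) * (n : Int)) > num then false
  else if pvInnerA num (n * n - 1) 2 then true
  else pvOuterA num (n + 1)
termination_by (num + 1 - 2 * ((n : Int) * (n : Int))).toNat
decreasing_by
  have h1 : ((n + 1 : Nat) : Int) * ((n + 1 : Nat) : Int)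
      = (n : Int) * (n : Int) + 2 * (n : Int) + 1 := by push_cast; ring
  generalize (n : Int) * (n : Int) = s at *
  omega

def is_multiple_of_natural_number_square (num : Int) : Bool := pvOuterA num 2

-- ===== PORT B =====
-- `_is_square`'s binary-search loop.
def pvIsSqAux (q lo hi : Int) : Bool :=
  if lo ≤ hi then
    let mid := PySem.Int.floordiv (lo + hi) 2
    let sq := mid * mid
    if sq = q then true
    else if sq < q then pvIsSqAux q (mid + 1) hi
    else pvIsSqAux q lo (mid - 1)
  else false
termination_by (hi + 1 - lo).toNat
decreasing_by
  all_goals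
    have := PySem.Int.floordiv_two_mid_bounds (by assumption : lo ≤ hi)
    omega

def pvIsSquare (q : Int) : Bool := pvIsSqAux q 0 q

-- Main loop of B over the multiplier.
def pvLoopB (num mul : Int) : Bool :=
  if 4 * mul ≤ num then
    if PySem.Int.mod num mul = 0 then
      if pvIsSquare (PySem.Int.floordiv num mul) then true
      else pvLoopB num (mul + 1)
    else pvLoopB num (mul + 1)
  else false
termination_by (num + 1 - 4 * mul).toNat
decreasing_by all_goals omega

def is_multiple_of_natural_number_square_alt (num : Int) : Bool := pvLoopB num 2

-- ===== PRECONDITION & SPEC =====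
def Spec_is_multiple_of_natural_number_square (num : Int) (out : Bool) : Prop := out = is_multiple_of_natural_number_square_alt num
instance (num : Int) (out : Bool) : Decidable (Spec_is_multiple_of_natural_number_square num out) := by unfold Spec_is_multiple_of_natural_number_square; infer_instance

-- ===== CLAIM (what is proved, stated in full; the proofs are below) =====
def Claim_equal_is_multiple_of_natural_number_square : Prop := ∀ (num : Int), Dom_is_multiple_of_natural_number_square num → Spec_is_multiple_of_natural_number_square num (is_multiple_of_natural_number_square num)

-- ===== LEMMAS AND PROOFS =====

theorem pvInnerA_iff (num : Int) (k mul : Nat) :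
    pvInnerA num k mul = true ↔ ∃ m : Nat, mul ≤ m ∧ (m : Int) * ((k : Int) + 1) = num := by
  fun_induction pvInnerA num k mul with
  | case1 mul hle heq =>
      simp only [true_iff]
      exact ⟨mul, le_refl _, heq⟩
  | case2 mul hle hne ih =>
      rw [ih]
      constructor
      · rintro ⟨m, hm, he⟩; exact ⟨m, by omega, he⟩
      · rintro ⟨m, hm, he⟩
        have hmne : m ≠ mul := by rintro rfl; exact hne he
        exact ⟨m, by omega, he⟩
  | case3 mul hgt =>
      simp only [Bool.false_eq_true, false_iff, not_exists, not_and]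
      intro m hm he
      have h1 : (mul : Int) ≤ (m : Int) := by exact_mod_cast hm
      have h2 := mul_le_mul_of_nonneg_right h1 (by positivity : (0:Int) ≤ (k : Int) + 1)
      linarith

theorem pvOuterA_iff (num : Int) (n : Nat) (hn : 1 ≤ n) :
    pvOuterA num n = true ↔
      ∃ n' : Nat, n ≤ n' ∧ ∃ m : Nat, 2 ≤ m ∧ (m : Int) * ((n' : Int) * (n' : Int)) = num := by
  revert hn
  fun_induction pvOuterA num n with
  | case1 n hgt =>
      intro hn
      simp only [Bool.false_eq_true, false_iff, not_exists, not_and]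
      intro n' hn' m hm he
      have h1 : (2 * (n * n) : Nat) ≤ m * (n' * n') :=
        Nat.mul_le_mul hm (Nat.mul_le_mul hn' hn')
      have h2 : ((2 * (n * n) : Nat) : Int) ≤ ((m * (n' * n') : Nat) : Int) := by exact_mod_cast h1
      push_cast at h2
      linarith
  | case2 n hle htrue =>
      intro hn
      rw [pvInnerA_iff] at htrue
      obtain ⟨m, hm, he⟩ := htrue
      have hk : ((n * n - 1 : Nat) : Int) + 1 = (n : Int) * (n : Int) := by
        have h1 : 1 ≤ n * n := Nat.one_le_iff_ne_zero.mpr (by positivity)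
        push_cast [Nat.cast_sub h1]
        ring
      rw [hk] at he
      simp only [true_iff]
      exact ⟨n, le_refl _, m, hm, he⟩
  | case3 n hle hfalse ih =>
      intro hn
      rw [ih (by omega)]
      constructor
      · rintro ⟨n', hn', m, hm, he⟩; exact ⟨n', by omega, m, hm, he⟩
      · rintro ⟨n', hn', m, hm, he⟩
        have hne : n' ≠ n := by
          rintro rfl
          have hk : ((n' * n' - 1 : Nat) : Int) + 1 = (n' : Int) * (n' : Int) := by
            have h1 : 1 ≤ n' * n' := Nat.one_le_iff_ne_zero.mpr (by positivity)
            push_cast [Nat.cast_sub h1]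
            ring
          have : pvInnerA num (n' * n' - 1) 2 = true := by
            rw [pvInnerA_iff, hk]
            exact ⟨m, hm, he⟩
          exact hfalse this
        exact ⟨n', by omega, m, hm, he⟩

theorem pvIsSqAux_iff (q lo hi : Int) (hlo : 0 ≤ lo) :
    pvIsSqAux q lo hi = true ↔ ∃ r : Int, lo ≤ r ∧ r ≤ hi ∧ r * r = q := by
  revert hlo
  fun_induction pvIsSqAux q lo hi with
  | case1 lo hi hle mid sq heq =>
      intro hlo
      have hmid := PySem.Int.floordiv_two_mid_bounds hle
      simp only [true_iff]
      exact ⟨mid, hmid.1, hmid.2, heq⟩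
  | case2 lo hi hle mid sq hne hlt ih =>
      intro hlo
      have hmid := PySem.Int.floordiv_two_mid_bounds hle
      rw [ih (by omega)]
      constructor
      · rintro ⟨r, h1, h2, h3⟩; exact ⟨r, by omega, h2, h3⟩
      · rintro ⟨r, h1, h2, h3⟩
        refine ⟨r, ?_, h2, h3⟩
        by_contra hcon
        have : r * r ≤ mid * mid :=
          mul_self_le_mul_self (by omega) (by omega)
        omega
  | case3 lo hi hle mid sq hne hge ih =>
      intro hlo
      have hmid := PySem.Int.floordiv_two_mid_bounds hle
      rw [ih hlo]
      constructor
      · rintro ⟨r, h1, h2, h3⟩; exact ⟨r, h1, by omega, h3⟩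
      · rintro ⟨r, h1, h2, h3⟩
        refine ⟨r, h1, ?_, h3⟩
        by_contra hcon
        have : mid * mid ≤ r * r :=
          mul_self_le_mul_self (by omega) (by omega)
        omega
  | case4 lo hi hgt =>
      intro hlo
      simp only [Bool.false_eq_true, false_iff, not_exists, not_and]
      intro r h1 h2
      omega

theorem pvIsSquare_iff (q : Int) (hq : 0 ≤ q) :
    pvIsSquare q = true ↔ ∃ r : Int, 0 ≤ r ∧ r * r = q := by
  rw [pvIsSquare, pvIsSqAux_iff q 0 q le_rfl]
  constructor
  · rintro ⟨r, h1, h2, h3⟩; exact ⟨r, h1, h3⟩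
  · rintro ⟨r, h1, h3⟩
    refine ⟨r, h1, ?_, h3⟩
    nlinarith

theorem pvLoopB_iff (num mul : Int) :
    pvLoopB num mul = true ↔
      ∃ m : Int, mul ≤ m ∧ 4 * m ≤ num ∧ PySem.Int.mod num m = 0 ∧
        pvIsSquare (PySem.Int.floordiv num m) = true := by
  fun_induction pvLoopB num mul with
  | case1 mul hle hmod hsq =>
      simp only [true_iff]
      exact ⟨mul, le_refl _, hle, hmod, hsq⟩
  | case2 mul hle hmod hsq ih =>
      rw [ih]
      constructor
      · rintro ⟨m, h1, h2, h3, h4⟩; exact ⟨m, by omega, h2, h3, h4⟩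
      · rintro ⟨m, h1, h2, h3, h4⟩
        have : m ≠ mul := by rintro rfl; simp [h4] at hsq
        exact ⟨m, by omega, h2, h3, h4⟩
  | case3 mul hle hmod ih =>
      rw [ih]
      constructor
      · rintro ⟨m, h1, h2, h3, h4⟩; exact ⟨m, by omega, h2, h3, h4⟩
      · rintro ⟨m, h1, h2, h3, h4⟩
        have : m ≠ mul := by rintro rfl; exact hmod h3
        exact ⟨m, by omega, h2, h3, h4⟩
  | case4 mul hgt =>
      simp only [Bool.false_eq_true, false_iff, not_exists, not_and]
      intro m h1 h2
      omega

-- ===== VERDICT (by name: the statement is the Claim_ definition above) =====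
theorem is_multiple_of_natural_number_square_spec : Claim_equal_is_multiple_of_natural_number_square := by
  intro num _
  unfold Spec_is_multiple_of_natural_number_square
  unfold is_multiple_of_natural_number_square is_multiple_of_natural_number_square_alt
  rw [Bool.eq_iff_iff, pvOuterA_iff num 2 (by norm_num), pvLoopB_iff num 2]
  constructor
  · rintro ⟨n', hn', m, hm, he⟩
    refine ⟨(m : Int), by exact_mod_cast hm, ?_, ?_, ?_⟩
    · have h1 : (m * 4 : Nat) ≤ m * (n' * n') :=
        Nat.mul_le_mul_left m (Nat.mul_le_mul hn' hn')
      have h2 : ((m * 4 : Nat) : Int) ≤ ((m * (n' * n') : Nat) : Int) := by exact_mod_cast h1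
      push_cast at h2
      linarith
    · rw [PySem.Int.mod_eq_zero_iff_dvd]
      exact ⟨(n' : Int) * (n' : Int), he.symm⟩
    · have hmpos : (0 : Int) < (m : Int) := by exact_mod_cast (by omega : 0 < m)
      have hdiv : PySem.Int.floordiv num (m : Int) = (n' : Int) * (n' : Int) := by
        rw [PySem.Int.floordiv_eq_ediv_of_pos hmpos, ← he,
          Int.mul_ediv_cancel_left _ (by omega : (m : Int) ≠ 0)]
      rw [hdiv, pvIsSquare_iff _ (by positivity)]
      exact ⟨(n' : Int), by positivity, rfl⟩
  · rintro ⟨M, hM2, h4M, hmod, hsq⟩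
    have hMpos : (0 : Int) < M := by omega
    have hdvd : M ∣ num := (PySem.Int.mod_eq_zero_iff_dvd num M).mp hmod
    have hdiv : PySem.Int.floordiv num M = num / M := PySem.Int.floordiv_eq_ediv_of_pos hMpos
    have hnum : M * (num / M) = num := Int.mul_ediv_cancel' hdvd
    have hq4 : 4 ≤ num / M := by
      have : M * 4 ≤ M * (num / M) := by linarith
      exact le_of_mul_le_mul_left this hMpos
    rw [hdiv, pvIsSquare_iff _ (by omega)] at hsq
    obtain ⟨r, hr0, hrq⟩ := hsq
    have hr2 : 2 ≤ r := by nlinarith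
    have hc1 : ((M.toNat : Int)) = M := Int.toNat_of_nonneg (by omega)
    have hc2 : ((r.toNat : Int)) = r := Int.toNat_of_nonneg hr0
    refine ⟨r.toNat, by omega, M.toNat, by omega, ?_⟩
    rw [hc1, hc2, hrq]
    exact hnum
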